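-- pv_equiv track=rewrite | github.com/asfdbw01/- | 구현/Lv1.둘만의_암호.py | solution
-- ===== SOURCE A (Python) =====
-- def solution(s, skip, index):
--     answer = ""
--
--     for a in s:
--         count = 0
--
--         while count < index:
--             a = chr(ord(a) + 1)
--
--             if ord(a) > 122:
--                 a = "a"
--
--             if a in skip:
--                 continue
--             count += 1
--
--         answer += a
--
--     return answer
-- ===== SOURCE B (Python) =====
-- def solution(s, skip, index):
--     # Build the reduced cyclic alphabet once, then answer each character by a
--     # closed-form position: the pre-cycle segment chr(ord(ch)+1)..'z' minus skip,
--     # followed by modular indexing into the skip-free lowercase alphabet.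
--     if index <= 0:
--         return s
--     skipset = set(skip)
--     filtered = [c for c in "abcdefghijklmnopqrstuvwxyz" if c not in skipset]
--     out = []
--     for ch in s:
--         pre = [chr(x) for x in range(ord(ch) + 1, 123) if chr(x) not in skipset]
--         if index <= len(pre):
--             out.append(pre[index - 1])
--         else:
--             out.append(filtered[(index - len(pre) - 1) % len(filtered)])
--     return "".join(out)
-- ===== Notes on version B (the rewrite author's own statement) =====
-- stated objective: faster
-- what changed: A advances each character one step at a time, re-testing skip membership index times per character; B computes each output character in closed form: the skip-free segment after the character up to 'z', then modular indexing into the once-built skip-free lowercase alphabet.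
import Mathlib
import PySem

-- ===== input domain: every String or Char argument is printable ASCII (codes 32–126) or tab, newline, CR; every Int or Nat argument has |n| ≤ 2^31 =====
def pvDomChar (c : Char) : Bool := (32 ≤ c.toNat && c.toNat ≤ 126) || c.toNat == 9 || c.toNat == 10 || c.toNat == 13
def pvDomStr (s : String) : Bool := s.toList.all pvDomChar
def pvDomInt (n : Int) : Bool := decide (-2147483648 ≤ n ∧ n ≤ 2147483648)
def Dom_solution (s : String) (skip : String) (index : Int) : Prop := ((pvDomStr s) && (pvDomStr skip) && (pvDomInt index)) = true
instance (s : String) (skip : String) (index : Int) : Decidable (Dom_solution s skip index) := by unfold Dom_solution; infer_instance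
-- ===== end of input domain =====

-- B replaces A's per-character repeated-stepping loop (O(index) steps per char) by a
-- closed-form lookup: the skip-free segment after the char, then modular indexing into
-- the skip-free lowercase alphabet (objective: faster for large index).

-- ===== PORT A =====
-- one Python loop iteration's character update: a = chr(ord(a)+1); if ord(a) > 122: a = 'a'
def pvStep (a : Char) : Char :=
  let b := Char.ofNat (a.toNat + 1)
  if b.toNat > 122 then 'a' else b

-- the inner `while count < index` loop; fuel only makes the recursion total
-- (inputs admitted by Pre_solution need at most index.toNat * 150 + 150 iterations)
def solLoopA (sk : List Char) (index : Int) : Nat → Char → Int → Char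
  | 0, a, _ => a
  | fuel+1, a, count =>
    if count < index then
      let a' := pvStep a
      if a' ∈ sk then solLoopA sk index fuel a' count
      else solLoopA sk index fuel a' (count + 1)
    else a

def solution (s : String) (skip : String) (index : Int) : String :=
  String.ofList
    (s.toList.foldl (fun acc a => acc ++ [solLoopA skip.toList index (index.toNat * 150 + 150) a 0]) [])

-- ===== PORT B =====
def lcAlpha : List Char :=
  ['a','b','c','d','e','f','g','h','i','j','k','l','m','n','o','p','q','r','s','t','u','v','w','x','y','z']

-- [chr(x) for x in range(lo, hi)]
def charRange (lo hi : Nat) : List Char := (List.range' lo (hi - lo)).map Char.ofNat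

-- [chr(x) for x in range(ord(ch)+1, 123) if chr(x) not in skipset]
def preOf (sk : List Char) (ch : Char) : List Char :=
  (charRange (ch.toNat + 1) 123).filter (fun c => decide (c ∉ sk))

def solution_alt (s : String) (skip : String) (index : Int) : String :=
  if index ≤ 0 then s
  else
    let sk := skip.toList
    let filtered := lcAlpha.filter (fun c => decide (c ∉ sk))
    String.ofList (s.toList.map (fun ch =>
      let pre := preOf sk ch
      if index ≤ (pre.length : Int) then pre.getD (index - 1).toNat 'a'
      else filtered.getD ((index - pre.length - 1) % (filtered.length : Int)).toNat 'a'))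

-- ===== PRECONDITION & SPEC =====
-- Pre_ excludes exactly the inputs on which A's while-loop never terminates: a positive
-- index with every lowercase letter in skip and some character of s whose skip-free
-- segment up to 'z' is shorter than index (A diverges there, B would divide by zero).
def Pre_solution (s : String) (skip : String) (index : Int) : Prop :=
  index ≤ 0 ∨ (lcAlpha.any (fun c => !(skip.toList.contains c)) = true) ∨
    (s.toList.all (fun c => decide (index ≤ ((preOf skip.toList c).length : Int))) = true)
instance (s : String) (skip : String) (index : Int) : Decidable (Pre_solution s skip index) := by
  unfold Pre_solution; infer_instance

def pvWitness_solution : String × String × Int := ("hit zum", "abcz", 5)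

def Spec_solution (s : String) (skip : String) (index : Int) (out : String) : Prop := out = solution_alt s skip index
instance (s : String) (skip : String) (index : Int) (out : String) : Decidable (Spec_solution s skip index out) := by unfold Spec_solution; infer_instance

-- ===== CLAIM (what is proved, stated in full; the proofs are below) =====
def Claim_equal_solution : Prop := ∀ (s : String) (skip : String) (index : Int), Dom_solution s skip index → Pre_solution s skip index → Spec_solution s skip index (solution s skip index)

-- ===== LEMMAS AND PROOFS =====

-- the skip-free lowercase alphabet ("filtered" in B)
def flt (sk : List Char) : List Char := lcAlpha.filter (fun c => decide (c ∉ sk))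

-- closed form for one character with m (= index) counted steps remaining, Nat arithmetic
def cf (sk : List Char) (a : Char) (m : Nat) : Char :=
  if m ≤ (preOf sk a).length then (preOf sk a).getD (m - 1) 'a'
  else (flt sk).getD ((m - (preOf sk a).length - 1) % (flt sk).length) 'a'

-- Run sk a m r n: from char a with m counted steps remaining, A's loop body reaches r in n iterations
inductive Run (sk : List Char) : Char → Nat → Char → Nat → Prop
  | zero (a : Char) : Run sk a 0 a 0
  | skip {a : Char} {m : Nat} {r : Char} {n : Nat} :
      pvStep a ∈ sk → 0 < m → Run sk (pvStep a) m r n → Run sk a m r (n + 1)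
  | count {a : Char} {m : Nat} {r : Char} {n : Nat} :
      pvStep a ∉ sk → Run sk (pvStep a) m r n → Run sk a (m + 1) r (n + 1)

theorem run_zero {sk : List Char} {a r : Char} {n : Nat} (h : Run sk a 0 r n) : r = a := by
  cases h with
  | zero => rfl
  | skip h1 h2 h3 => omega

theorem charOfNat_toNat (n : Nat) (h : n < 55296) : (Char.ofNat n).toNat = n := by
  have hv : Nat.isValidChar n := Or.inl h
  simp [Char.ofNat, hv]

theorem pvStep_toNat_of_le (a : Char) (h : a.toNat ≤ 126) (h2 : a.toNat ≤ 121) :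
    (pvStep a).toNat = a.toNat + 1 := by
  have hb : (Char.ofNat (a.toNat + 1)).toNat = a.toNat + 1 := charOfNat_toNat _ (by omega)
  simp only [pvStep, hb]
  rw [if_neg (by omega)]
  exact hb

theorem pvStep_wrap (a : Char) (h : a.toNat ≤ 126) (h2 : 122 ≤ a.toNat) : pvStep a = 'a' := by
  have hb : (Char.ofNat (a.toNat + 1)).toNat = a.toNat + 1 := charOfNat_toNat _ (by omega)
  simp only [pvStep, hb]
  rw [if_pos (by omega)]

theorem pvStep_le (a : Char) (h : a.toNat ≤ 126) : (pvStep a).toNat ≤ 122 := by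
  by_cases h2 : a.toNat ≤ 121
  · rw [pvStep_toNat_of_le a h h2]; omega
  · rw [pvStep_wrap a h (by omega)]; decide

theorem pvStep_eq_ofNat (a : Char) (h2 : a.toNat ≤ 121) :
    pvStep a = Char.ofNat (a.toNat + 1) := by
  have hb : (Char.ofNat (a.toNat + 1)).toNat = a.toNat + 1 := charOfNat_toNat _ (by omega)
  simp only [pvStep, hb]
  rw [if_neg (by omega)]

theorem charRange_cons (lo hi : Nat) (h : lo < hi) :
    charRange lo hi = Char.ofNat lo :: charRange (lo + 1) hi := by
  unfold charRange
  rw [show hi - lo = (hi - (lo + 1)) + 1 by omega, List.range'_succ]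
  rfl

-- segment unfolding
theorem preOf_eq_cons (sk : List Char) (a : Char) (h2 : a.toNat ≤ 121) :
    preOf sk a = if pvStep a ∈ sk then preOf sk (pvStep a) else pvStep a :: preOf sk (pvStep a) := by
  have hstep : pvStep a = Char.ofNat (a.toNat + 1) := pvStep_eq_ofNat a h2
  have htn : (pvStep a).toNat = a.toNat + 1 := pvStep_toNat_of_le a (by omega) h2
  have hcons : charRange (a.toNat + 1) 123 = pvStep a :: charRange (a.toNat + 2) 123 := by
    rw [charRange_cons _ _ (by omega), ← hstep]
  have hpre : preOf sk (pvStep a) = (charRange (a.toNat + 2) 123).filter (fun c => decide (c ∉ sk)) := by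
    unfold preOf; rw [htn]
  unfold preOf
  rw [hcons, List.filter_cons, htn]
  by_cases hs : pvStep a ∈ sk <;> simp [hs]

theorem preOf_nil_of_ge (sk : List Char) (a : Char) (h2 : 122 ≤ a.toNat) : preOf sk a = [] := by
  unfold preOf charRange
  rw [Nat.sub_eq_zero_of_le (by omega)]
  rfl

-- entering the lowercase cycle at 'a'
theorem flt_eq (sk : List Char) :
    flt sk = if 'a' ∈ sk then preOf sk 'a' else 'a' :: preOf sk 'a' := by
  have h1 : lcAlpha = 'a' :: charRange 98 123 := by decide
  have h2 : preOf sk 'a' = (charRange 98 123).filter (fun c => decide (c ∉ sk)) := rfl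
  unfold flt
  rw [h1, List.filter_cons, h2]
  by_cases hs : 'a' ∈ sk <;> simp [hs]

-- ===== cf step lemmas =====
theorem cf_skip (sk : List Char) (a : Char) (m : Nat) (ha : a.toNat ≤ 126) (hm : 1 ≤ m)
    (hs : pvStep a ∈ sk) (hH : flt sk ≠ [] ∨ m ≤ (preOf sk a).length) :
    cf sk a m = cf sk (pvStep a) m := by
  by_cases h2 : a.toNat ≤ 121
  · have hpre : preOf sk a = preOf sk (pvStep a) := by
      rw [preOf_eq_cons sk a h2, if_pos hs]
    unfold cf; rw [hpre]
  · have hw : pvStep a = 'a' := pvStep_wrap a ha (by omega)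
    have hnil : preOf sk a = [] := preOf_nil_of_ge sk a (by omega)
    have hfe : flt sk = preOf sk 'a' := by rw [flt_eq, if_pos (hw ▸ hs)]
    have hF : 0 < (flt sk).length := by
      rcases hH with hf | hle
      · exact List.length_pos_iff.mpr hf
      · rw [hnil] at hle; simp at hle; omega
    unfold cf
    rw [hnil, hw, ← hfe]
    simp only [List.length_nil]
    rw [if_neg (by omega)]
    by_cases h3 : m ≤ (flt sk).length
    · rw [if_pos h3]
      congr 1
      rw [Nat.mod_eq_of_lt (by omega)]
      omega
    · rw [if_neg h3]
      congr 1
      rw [Nat.mod_eq_sub_mod (by omega : m - 0 - 1 ≥ (flt sk).length)]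
      congr 1
      omega

theorem cf_count_one (sk : List Char) (a : Char) (ha : a.toNat ≤ 126)
    (hs : pvStep a ∉ sk) (_hH : flt sk ≠ [] ∨ 1 ≤ (preOf sk a).length) :
    cf sk a 1 = pvStep a := by
  by_cases h2 : a.toNat ≤ 121
  · have hpre : preOf sk a = pvStep a :: preOf sk (pvStep a) := by
      rw [preOf_eq_cons sk a h2, if_neg hs]
    unfold cf
    rw [hpre, if_pos (by simp)]
    rfl
  · have hw : pvStep a = 'a' := pvStep_wrap a ha (by omega)
    have hnil : preOf sk a = [] := preOf_nil_of_ge sk a (by omega)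
    have hfe : flt sk = 'a' :: preOf sk 'a' := by rw [flt_eq, if_neg (hw ▸ hs)]
    unfold cf
    rw [hnil, hw, hfe]
    simp

theorem cf_count (sk : List Char) (a : Char) (m : Nat) (ha : a.toNat ≤ 126) (hm : 1 ≤ m)
    (hs : pvStep a ∉ sk) (_hH : flt sk ≠ [] ∨ m + 1 ≤ (preOf sk a).length) :
    cf sk a (m + 1) = cf sk (pvStep a) m := by
  by_cases h2 : a.toNat ≤ 121
  · have hpre : preOf sk a = pvStep a :: preOf sk (pvStep a) := by
      rw [preOf_eq_cons sk a h2, if_neg hs]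
    unfold cf
    rw [hpre]
    simp only [List.length_cons]
    by_cases h3 : m ≤ (preOf sk (pvStep a)).length
    · rw [if_pos (by omega), if_pos h3]
      rw [show m + 1 - 1 = (m - 1) + 1 by omega]
      simp
    · rw [if_neg (by omega), if_neg h3]
      rw [show m + 1 - ((preOf sk (pvStep a)).length + 1) - 1
            = m - (preOf sk (pvStep a)).length - 1 by omega]
  · have hw : pvStep a = 'a' := pvStep_wrap a ha (by omega)
    have hnil : preOf sk a = [] := preOf_nil_of_ge sk a (by omega)
    have hfe : flt sk = 'a' :: preOf sk 'a' := by rw [flt_eq, if_neg (hw ▸ hs)]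
    have hF : (flt sk).length = (preOf sk 'a').length + 1 := by rw [hfe]; simp
    unfold cf
    rw [hnil, hw]
    simp only [List.length_nil]
    rw [if_neg (by omega)]
    by_cases h3 : m ≤ (preOf sk 'a').length
    · rw [if_pos h3]
      have hmod : (m + 1 - 0 - 1) % (flt sk).length = m := by
        rw [Nat.mod_eq_of_lt (by omega)]; omega
      rw [hmod, hfe]
      rw [show m = (m - 1) + 1 by omega]
      simp
    · rw [if_neg h3]
      congr 1
      rw [Nat.mod_eq_sub_mod (by omega : m + 1 - 0 - 1 ≥ (flt sk).length)]
      congr 1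
      omega

theorem H_skip (sk : List Char) (a : Char) (m : Nat) (hm : 1 ≤ m) (ha : a.toNat ≤ 126)
    (hs : pvStep a ∈ sk) (hH : flt sk ≠ [] ∨ m ≤ (preOf sk a).length) :
    flt sk ≠ [] ∨ m ≤ (preOf sk (pvStep a)).length := by
  rcases hH with hf | hle
  · exact Or.inl hf
  · by_cases h2 : a.toNat ≤ 121
    · right; rw [preOf_eq_cons sk a h2, if_pos hs] at hle; exact hle
    · rw [preOf_nil_of_ge sk a (by omega)] at hle; simp at hle; omega

theorem H_count (sk : List Char) (a : Char) (m : Nat) (ha : a.toNat ≤ 126)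
    (hs : pvStep a ∉ sk) (hH : flt sk ≠ [] ∨ m + 1 ≤ (preOf sk a).length) :
    flt sk ≠ [] ∨ m ≤ (preOf sk (pvStep a)).length := by
  rcases hH with hf | hle
  · exact Or.inl hf
  · by_cases h2 : a.toNat ≤ 121
    · right
      rw [preOf_eq_cons sk a h2, if_neg hs] at hle
      simp at hle
      omega
    · rw [preOf_nil_of_ge sk a (by omega)] at hle; simp at hle

-- ===== L3: a Run's result is the closed form =====
theorem run_cf (sk : List Char) : ∀ {a : Char} {m : Nat} {r : Char} {n : Nat},
    Run sk a m r n → 1 ≤ m → a.toNat ≤ 126 →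
    (flt sk ≠ [] ∨ m ≤ (preOf sk a).length) → r = cf sk a m := by
  intro a m r n h
  induction h with
  | zero a => intro hm; omega
  | skip hs hm hrun ih =>
    intro _ ha hH
    have ha' : (pvStep _).toNat ≤ 126 := le_trans (pvStep_le _ ha) (by norm_num)
    rw [ih hm ha' (H_skip sk _ _ hm ha hs hH)]
    exact (cf_skip sk _ _ ha hm hs hH).symm
  | count hs hrun ih =>
    rename_i a m r n
    intro _ ha hH
    have ha' : (pvStep a).toNat ≤ 126 := le_trans (pvStep_le a ha) (by norm_num)
    by_cases hm0 : m = 0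
    · subst hm0
      rw [run_zero hrun]
      exact (cf_count_one sk a ha hs hH).symm
    · rw [ih (by omega) ha' (H_count sk a m ha hs hH)]
      exact (cf_count sk a m ha (by omega) hs hH).symm

-- ===== L1: the fueled loop follows a Run =====
theorem loop_run (sk : List Char) (index : Int) : ∀ {a : Char} {m : Nat} {r : Char} {n : Nat},
    Run sk a m r n → ∀ (fuel : Nat) (count : Int), n ≤ fuel → count = index - m →
    solLoopA sk index fuel a count = r := by
  intro a m r n h
  induction h with
  | zero a =>
    intro fuel count _ hc
    have hc' : count = index := by omega
    cases fuel with
    | zero => rfl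
    | succ f => simp only [solLoopA]; rw [if_neg (by omega)]
  | skip hs hm hrun ih =>
    intro fuel count hf hc
    cases fuel with
    | zero => omega
    | succ f =>
      simp only [solLoopA]
      rw [if_pos (by omega), if_pos hs]
      exact ih f count (by omega) hc
  | count hs hrun ih =>
    rename_i a m r n
    intro fuel count hf hc
    cases fuel with
    | zero => omega
    | succ f =>
      simp only [solLoopA]
      rw [if_pos (by push_cast at hc ⊢; omega), if_neg hs]
      exact ih f (count + 1) (by omega) (by push_cast at hc ⊢; omega)

-- ===== L2: existence of a Run with bounded length =====
theorem run_chain (sk : List Char) : ∀ (k : Nat) {a : Char} {m : Nat} {r : Char} {n : Nat},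
    (∀ j, 1 ≤ j → j ≤ k → pvStep^[j] a ∈ sk) → 0 < m → Run sk (pvStep^[k] a) m r n →
    Run sk a m r (n + k) := by
  intro k
  induction k with
  | zero => intro a m r n _ _ h; simpa using h
  | succ k ih =>
    intro a m r n hchain hm hrun
    have h1 : pvStep a ∈ sk := by
      have := hchain 1 (by omega) (by omega)
      simpa using this
    have hrun' : Run sk (pvStep^[k] (pvStep a)) m r n := by
      rwa [Function.iterate_succ_apply] at hrun
    have hchain' : ∀ j, 1 ≤ j → j ≤ k → pvStep^[j] (pvStep a) ∈ sk := by
      intro j hj1 hj2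
      rw [← Function.iterate_succ_apply]
      exact hchain (j + 1) (by omega) (by omega)
    have := Run.skip h1 hm (ih hchain' hm hrun')
    rwa [show n + k + 1 = n + (k + 1) by omega] at this

-- from a char whose whole skip-free segment is empty, all-skipped steps reach 'a'
theorem reach_a (sk : List Char) : ∀ (n : Nat) (a : Char), a.toNat ≤ 126 → 122 ≤ a.toNat + n →
    preOf sk a = [] → ∃ K, 1 ≤ K ∧ K ≤ n + 1 ∧ pvStep^[K] a = 'a' ∧
      (∀ j, 1 ≤ j → j < K → pvStep^[j] a ∈ sk) := by
  intro n
  induction n with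
  | zero =>
    intro a ha hn _
    exact ⟨1, by omega, by omega, by simpa using pvStep_wrap a ha (by omega), by omega⟩
  | succ n ih =>
    intro a ha hn hp
    by_cases h2 : 122 ≤ a.toNat
    · exact ⟨1, by omega, by omega, by simpa using pvStep_wrap a ha h2, by omega⟩
    · have h2' : a.toNat ≤ 121 := by omega
      have hcons := preOf_eq_cons sk a h2'
      by_cases hs : pvStep a ∈ sk
      · rw [if_pos hs] at hcons
        have hp' : preOf sk (pvStep a) = [] := by rw [← hcons]; exact hp
        have ha' : (pvStep a).toNat ≤ 126 := le_trans (pvStep_le a ha) (by norm_num)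
        have htn : (pvStep a).toNat = a.toNat + 1 := pvStep_toNat_of_le a ha h2'
        obtain ⟨K, hK1, hK2, hKa, hKc⟩ := ih (pvStep a) ha' (by omega) hp'
        refine ⟨K + 1, by omega, by omega, ?_, ?_⟩
        · rw [Function.iterate_succ_apply]; exact hKa
        · intro j hj1 hj2
          rcases Nat.eq_or_lt_of_le hj1 with hj | hj
          · simpa [← hj] using hs
          · rw [show j = (j - 1) + 1 by omega, Function.iterate_succ_apply]
            exact hKc (j - 1) (by omega) (by omega)
      · rw [if_neg hs] at hcons
        rw [hcons] at hp
        exact absurd hp (by simp)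

-- first skip-free char in the segment: reached by all-skipped steps, and it heads preOf
theorem next_in_seg (sk : List Char) : ∀ (n : Nat) (a : Char), a.toNat ≤ 126 → 122 ≤ a.toNat + n →
    (preOf sk a ≠ []) → ∃ k, k + 1 ≤ n + 1 ∧
      (∀ j, 1 ≤ j → j ≤ k → pvStep^[j] a ∈ sk) ∧
      (preOf sk a).head? = some (pvStep^[k + 1] a) ∧ pvStep^[k + 1] a ∉ sk := by
  intro n
  induction n with
  | zero =>
    intro a ha hn hp
    exact absurd (preOf_nil_of_ge sk a (by omega)) hp
  | succ n ih =>
    intro a ha hn hp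
    by_cases h2 : 122 ≤ a.toNat
    · exact absurd (preOf_nil_of_ge sk a h2) hp
    · have h2' : a.toNat ≤ 121 := by omega
      have hcons := preOf_eq_cons sk a h2'
      by_cases hs : pvStep a ∈ sk
      · rw [if_pos hs] at hcons
        have ha' : (pvStep a).toNat ≤ 126 := le_trans (pvStep_le a ha) (by norm_num)
        have htn : (pvStep a).toNat = a.toNat + 1 := pvStep_toNat_of_le a ha h2'
        obtain ⟨k, hk1, hkc, hkh, hks⟩ := ih (pvStep a) ha' (by omega) (by rw [← hcons]; exact hp)
        refine ⟨k + 1, by omega, ?_, ?_, ?_⟩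
        · intro j hj1 hj2
          rcases Nat.eq_or_lt_of_le hj1 with hj | hj
          · simpa [← hj] using hs
          · rw [show j = (j - 1) + 1 by omega, Function.iterate_succ_apply]
            exact hkc (j - 1) (by omega) (by omega)
        · rw [hcons, show k + 1 + 1 = (k + 1) + 1 by rfl, Function.iterate_succ_apply]
          exact hkh
        · rw [Function.iterate_succ_apply (n := k + 1)]
          exact hks
      · rw [if_neg hs] at hcons
        refine ⟨0, by omega, by omega, ?_, by simpa using hs⟩
        rw [hcons]
        simp

theorem preOf_head_tail (sk : List Char) : ∀ (n : Nat) (a : Char), a.toNat ≤ 126 →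
    122 ≤ a.toNat + n → ∀ b, (preOf sk a).head? = some b →
    preOf sk b = (preOf sk a).tail := by
  intro n
  induction n with
  | zero =>
    intro a ha hn b hb
    rw [preOf_nil_of_ge sk a (by omega)] at hb
    simp at hb
  | succ n ih =>
    intro a ha hn b hb
    by_cases h2 : 122 ≤ a.toNat
    · rw [preOf_nil_of_ge sk a h2] at hb; simp at hb
    · have h2' : a.toNat ≤ 121 := by omega
      have hcons := preOf_eq_cons sk a h2'
      have ha' : (pvStep a).toNat ≤ 126 := le_trans (pvStep_le a ha) (by norm_num)
      have htn : (pvStep a).toNat = a.toNat + 1 := pvStep_toNat_of_le a ha h2'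
      by_cases hs : pvStep a ∈ sk
      · rw [if_pos hs] at hcons
        rw [hcons] at hb ⊢
        exact ih (pvStep a) ha' (by omega) b hb
      · rw [if_neg hs] at hcons
        rw [hcons] at hb ⊢
        simp at hb
        subst hb
        simp

theorem iterate_pvStep_le (a : Char) (ha : a.toNat ≤ 126) :
    ∀ j, (pvStep^[j] a).toNat ≤ 126 := by
  intro j
  induction j with
  | zero => simpa using ha
  | succ j ih =>
    rw [Function.iterate_succ_apply']
    exact le_trans (pvStep_le _ ih) (by norm_num)

theorem next_after_seg (sk : List Char) (a : Char) (ha : a.toNat ≤ 126)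
    (hp : preOf sk a = []) (hf : flt sk ≠ []) :
    ∃ k, k + 1 ≤ 149 ∧ (∀ j, 1 ≤ j → j ≤ k → pvStep^[j] a ∈ sk) ∧ pvStep^[k + 1] a ∉ sk := by
  obtain ⟨K, hK1, hK2, hKa, hKc⟩ := reach_a sk 122 a ha (by omega) hp
  by_cases hsa : 'a' ∈ sk
  · have hfe : flt sk = preOf sk 'a' := by rw [flt_eq, if_pos hsa]
    have hpa : preOf sk 'a' ≠ [] := by rw [← hfe]; exact hf
    obtain ⟨k', hk'1, hk'c, hk'h, hk's⟩ := next_in_seg sk 25 'a' (by decide) (by decide) hpa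
    refine ⟨K + k', by omega, ?_, ?_⟩
    · intro j hj1 hj2
      by_cases hjK : j < K
      · exact hKc j hj1 hjK
      · by_cases hjK2 : j = K
        · rw [hjK2, hKa]; exact hsa
        · rw [show j = (j - K) + K by omega, Function.iterate_add_apply, hKa]
          exact hk'c (j - K) (by omega) (by omega)
    · rw [show K + k' + 1 = (k' + 1) + K by omega, Function.iterate_add_apply, hKa]
      exact hk's
  · refine ⟨K - 1, by omega, ?_, ?_⟩
    · intro j hj1 hj2
      exact hKc j hj1 (by omega)
    · rw [show K - 1 + 1 = K by omega, hKa]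
      exact hsa

theorem mem_preOf (sk : List Char) (a b : Char) (h : b ∈ preOf sk a) :
    b ∉ sk ∧ b.toNat ≤ 122 := by
  unfold preOf at h
  rw [List.mem_filter] at h
  obtain ⟨hm, hpb⟩ := h
  refine ⟨by simpa using hpb, ?_⟩
  unfold charRange at hm
  rw [List.mem_map] at hm
  obtain ⟨x, hx, hbx⟩ := hm
  rw [List.mem_range'] at hx
  obtain ⟨i, hi, hxi⟩ := hx
  have : x ≤ 122 := by omega
  rw [← hbx, charOfNat_toNat x (by omega)]
  exact this

theorem run_exists (sk : List Char) : ∀ (m : Nat) (a : Char), a.toNat ≤ 126 →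
    (flt sk ≠ [] ∨ m ≤ (preOf sk a).length) →
    ∃ r n, Run sk a m r n ∧ n ≤ 150 * m := by
  intro m
  induction m with
  | zero => intro a _ _; exact ⟨a, 0, Run.zero a, by omega⟩
  | succ m ih =>
    intro a ha hH
    by_cases hp : preOf sk a = []
    · have hf : flt sk ≠ [] := by
        rcases hH with hf | hle
        · exact hf
        · rw [hp] at hle; simp at hle
      obtain ⟨k, hk1, hkc, hks⟩ := next_after_seg sk a ha hp hf
      have hb : (pvStep^[k + 1] a).toNat ≤ 126 := iterate_pvStep_le a ha (k + 1)
      obtain ⟨r, n, hrun, hn⟩ := ih (pvStep^[k + 1] a) hb (Or.inl hf)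
      have he : pvStep (pvStep^[k] a) = pvStep^[k + 1] a :=
        (Function.iterate_succ_apply' pvStep k a).symm
      have hstep : Run sk (pvStep^[k] a) (m + 1) r (n + 1) := by
        apply Run.count
        · rw [he]; exact hks
        · rw [he]; exact hrun
      have := run_chain sk k hkc (by omega) hstep
      exact ⟨r, n + 1 + k, this, by omega⟩
    · obtain ⟨k, hk1, hkc, hkh, hks⟩ := next_in_seg sk 122 a ha (by omega) hp
      set b := pvStep^[k + 1] a with hbdef
      have hbmem : b ∈ preOf sk a := List.mem_of_mem_head? hkh
      have hb : b.toNat ≤ 126 := le_trans (mem_preOf sk a b hbmem).2 (by norm_num)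
      have htail : preOf sk b = (preOf sk a).tail := preOf_head_tail sk 122 a ha (by omega) b hkh
      have hH' : flt sk ≠ [] ∨ m ≤ (preOf sk b).length := by
        rcases hH with hf | hle
        · exact Or.inl hf
        · right
          rw [htail, List.length_tail]
          omega
      obtain ⟨r, n, hrun, hn⟩ := ih b hb hH'
      have he : pvStep (pvStep^[k] a) = pvStep^[k + 1] a :=
        (Function.iterate_succ_apply' pvStep k a).symm
      have hstep : Run sk (pvStep^[k] a) (m + 1) r (n + 1) := by
        apply Run.count
        · rw [he]; exact hks
        · rw [he]; exact hrun
      have := run_chain sk k hkc (by omega) hstep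
      exact ⟨r, n + 1 + k, this, by omega⟩

-- foldl-append builds the map
theorem foldl_append_map {α β : Type} (f : α → β) :
    ∀ (l : List α) (acc : List β), l.foldl (fun acc a => acc ++ [f a]) acc = acc ++ l.map f := by
  intro l
  induction l with
  | nil => simp
  | cons x xs ih => intro acc; simp [List.foldl, ih]

-- ===== VERDICT (by name: the statement is the Claim_ definition above) =====
theorem loop_stop (sk : List Char) (index : Int) (fuel : Nat) (a : Char) (count : Int)
    (h : ¬ count < index) : solLoopA sk index fuel a count = a := by
  cases fuel with
  | zero => rfl
  | succ f => simp only [solLoopA]; rw [if_neg h]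

theorem flt_ne_nil (sk : List Char) (x : Char) (hx : x ∈ lcAlpha) (hs : x ∉ sk) :
    flt sk ≠ [] := by
  intro hnil
  unfold flt at hnil
  rw [List.filter_eq_nil_iff] at hnil
  exact (hnil x hx) (by simpa using hs)

theorem solution_spec : Claim_equal_solution := by
  intro s skip index hdom hpre
  unfold Spec_solution solution solution_alt
  rw [foldl_append_map]
  simp only [List.nil_append]
  by_cases hix : index ≤ 0
  · rw [if_pos hix]
    have hmap : s.toList.map (fun a => solLoopA skip.toList index (index.toNat * 150 + 150) a 0)
        = s.toList.map id := by
      apply List.map_congr_left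
      intro c _
      exact loop_stop skip.toList index _ c 0 (by omega)
    rw [hmap, List.map_id, String.ofList_toList]
  · rw [if_neg hix]
    congr 1
    apply List.map_congr_left
    intro c hc
    have hdc : c.toNat ≤ 126 := by
      have hall : pvDomStr s = true := by
        unfold Dom_solution at hdom
        simp only [Bool.and_eq_true] at hdom
        exact hdom.1.1
      unfold pvDomStr at hall
      rw [List.all_eq_true] at hall
      have := hall c hc
      unfold pvDomChar at this
      simp only [Bool.or_eq_true, Bool.and_eq_true, decide_eq_true_eq, beq_iff_eq] at this
      omega
    have hmi : (index.toNat : Int) = index := Int.toNat_of_nonneg (by omega)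
    have hm1 : 1 ≤ index.toNat := by omega
    have hHc : flt skip.toList ≠ [] ∨ index.toNat ≤ (preOf skip.toList c).length := by
      rcases hpre with h1 | h2 | h3
      · omega
      · rw [List.any_eq_true] at h2
        obtain ⟨x, hxl, hxs⟩ := h2
        simp only [Bool.not_eq_true', List.contains_eq_mem, decide_eq_false_iff_not] at hxs
        exact Or.inl (flt_ne_nil skip.toList x hxl hxs)
      · right
        rw [List.all_eq_true] at h3
        have := h3 c hc
        simp only [decide_eq_true_eq] at this
        omega
    obtain ⟨r, n, hrun, hn⟩ := run_exists skip.toList index.toNat c hdc hHc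
    rw [loop_run skip.toList index hrun (index.toNat * 150 + 150) 0 (by omega) (by omega)]
    rw [run_cf skip.toList hrun hm1 hdc hHc]
    show cf skip.toList c index.toNat = _
    unfold cf flt
    by_cases hle : index.toNat ≤ (preOf skip.toList c).length
    · rw [if_pos hle, if_pos (show index ≤ ((preOf skip.toList c).length : Int) by omega)]
      congr 1
      omega
    · have hf : flt skip.toList ≠ [] := by
        rcases hHc with hf | h
        · exact hf
        · omega
      have hF : 0 < (flt skip.toList).length := List.length_pos_iff.mpr hf
      unfold flt at hF
      rw [if_neg hle, if_neg (show ¬ index ≤ ((preOf skip.toList c).length : Int) by omega)]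
      congr 1
      have h4 : index - ((preOf skip.toList c).length : Int) - 1
          = ((index.toNat - (preOf skip.toList c).length - 1 : Nat) : Int) := by
        omega
      rw [h4, ← Int.natCast_mod, Int.toNat_natCast]
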